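-- pv_equiv track=rewrite | github.com/QuHarmonics/Nexus-4-Framework-Recursive-Harmonic-Architecture | Python Code - Raw Dump/Nexus 4 Framework -Harmonic Nexus 3 Bitcoin Mining Paradigm -checkpoint-code_4- Qu Harmonics.py | byte1_nonce_generator
-- ===== SOURCE A (Python) =====
-- def byte1_nonce_generator(seed_a=0, seed_b=9, limit=1000, memory_stack=None):
--     """Generate nonces with recursive folding logic and optional memory stack."""
--     stack = memory_stack[:] if memory_stack else [seed_a, seed_b]
--     nonces = []
--
--     for _ in range(limit):
--         if len(stack) < 2:
--             break
--         A = stack[-2]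
--         B = stack[-1]
--         C = len(bin(B - A)[2:]) if B - A > 0 else 1
--         stack.append(C)
--         stack.append(C)
--         Z = A + B
--         stack.append(Z)
--         D = Z - B
--         stack[-3] = D
--         Y = Z + B
--         stack.append(Y)
--         X = len(stack)
--         stack.append(X)
--         total = sum(stack)
--         compressed = len(bin(total)[2:])
--         stack.append(compressed)
--         close_byte = A + B
--         stack.append(close_byte)
--         nonces.append(stack[-1])
--     return nonces, stack
-- ===== SOURCE B (Python) =====
-- def _bin_len(n):
--     """len(bin(n)[2:]) for any int n."""
--     if n > 0:
--         return n.bit_length()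
--     if n == 0:
--         return 1
--     return (-n).bit_length() + 1
--
--
-- def byte1_nonce_generator(seed_a=0, seed_b=9, limit=1000, memory_stack=None):
--     """O(limit): keeps a running sum and tracks the top two stack values in
--     variables, appending each iteration's 7-element block at once instead of
--     re-summing and re-indexing the whole stack."""
--     stack = list(memory_stack) if memory_stack else [seed_a, seed_b]
--     nonces = []
--     if len(stack) < 2:
--         return nonces, stack
--     a, b = stack[-2], stack[-1]
--     total = sum(stack)
--     n = len(stack)
--     for _ in range(limit):
--         c = _bin_len(b - a) if b - a > 0 else 1
--         z = a + b
--         d = z - b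
--         y = z + b
--         x = n + 4
--         t = total + d + c + z + y + x
--         compressed = _bin_len(t)
--         close = a + b
--         stack.extend((d, c, z, y, x, compressed, close))
--         nonces.append(close)
--         total = t + compressed + close
--         n += 7
--         a, b = compressed, close
--     return nonces, stack
-- ===== Notes on version B (the rewrite author's own statement) =====
-- stated objective: faster
-- what changed: B keeps a running sum, the stack length and the top-two values in scalar variables and appends each iteration's 7-element block in one extend, instead of re-summing and negatively indexing the whole growing stack every iteration.
import Mathlib
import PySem

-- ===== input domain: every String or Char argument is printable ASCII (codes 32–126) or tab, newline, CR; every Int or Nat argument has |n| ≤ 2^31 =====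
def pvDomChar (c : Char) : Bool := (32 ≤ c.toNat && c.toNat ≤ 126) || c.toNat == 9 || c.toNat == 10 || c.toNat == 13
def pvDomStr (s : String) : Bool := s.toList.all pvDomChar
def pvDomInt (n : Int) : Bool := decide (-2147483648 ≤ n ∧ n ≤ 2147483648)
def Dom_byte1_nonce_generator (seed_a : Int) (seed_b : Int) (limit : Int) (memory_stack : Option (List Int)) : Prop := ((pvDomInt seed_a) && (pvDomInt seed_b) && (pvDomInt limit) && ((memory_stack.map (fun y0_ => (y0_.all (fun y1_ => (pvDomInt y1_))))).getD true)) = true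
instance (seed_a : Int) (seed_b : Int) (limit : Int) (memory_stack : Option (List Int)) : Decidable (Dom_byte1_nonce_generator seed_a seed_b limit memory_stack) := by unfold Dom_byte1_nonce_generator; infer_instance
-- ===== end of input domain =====

-- B replaces A's per-iteration re-summation of the whole stack by a running sum and
-- tracked top-two values, appending each iteration's 7-element block at once (O(limit) vs O(limit^2)).


-- ===== PORT A =====
-- len(bin(n)[2:]) for an arbitrary Python int n (bin(-k) = '-0b…', so [2:] keeps the 'b')
def binDigits (n : Int) : Int :=
  if n > 0 then (n.toNat.size : Int)
  else if n = 0 then 1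
  else ((-n).toNat.size : Int) + 1

def loopA : Nat → List Int → List Int → List Int × List Int
  | 0, nonces, stack => (nonces, stack)
  | fuel+1, nonces, stack =>
    if stack.length < 2 then (nonces, stack)
    else
      let A := stack.getD (stack.length - 2) 0
      let B := stack.getD (stack.length - 1) 0
      let C := if B - A > 0 then binDigits (B - A) else 1
      let s1 := stack ++ [C]
      let s2 := s1 ++ [C]
      let Z := A + B
      let s3 := s2 ++ [Z]
      let D := Z - B
      let s4 := s3.set (s3.length - 3) D
      let Y := Z + B
      let s5 := s4 ++ [Y]
      let X : Int := (s5.length : Int)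
      let s6 := s5 ++ [X]
      let total := s6.sum
      let compressed := binDigits total
      let s7 := s6 ++ [compressed]
      let close := A + B
      let s8 := s7 ++ [close]
      loopA fuel (nonces ++ [s8.getD (s8.length - 1) 0]) s8

def byte1_nonce_generator (seed_a : Int) (seed_b : Int) (limit : Int) (memory_stack : Option (List Int)) : List Int × List Int :=
  let stack := match memory_stack with
    | some l => if l.isEmpty then [seed_a, seed_b] else l
    | none => [seed_a, seed_b]
  loopA limit.toNat [] stack

-- ===== PORT B =====
-- one O(1) step per iteration: running sum `total`, tracked top-two (a, b), length `n`
def loopB : Nat → List Int → List Int → Int → Int → Int → Int → List Int × List Int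
  | 0, nonces, stack, _, _, _, _ => (nonces, stack)
  | fuel+1, nonces, stack, a, b, total, n =>
    let c := if b - a > 0 then binDigits (b - a) else 1
    let z := a + b
    let d := z - b
    let y := z + b
    let x := n + 4
    let t := total + d + c + z + y + x
    let compressed := binDigits t
    let close := a + b
    loopB fuel (nonces ++ [close]) (stack ++ [d, c, z, y, x, compressed, close])
      compressed close (t + compressed + close) (n + 7)

def byte1_nonce_generator_alt (seed_a : Int) (seed_b : Int) (limit : Int) (memory_stack : Option (List Int)) : List Int × List Int :=
  let stack := match memory_stack with
    | some l => if l.isEmpty then [seed_a, seed_b] else l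
    | none => [seed_a, seed_b]
  if stack.length < 2 then ([], stack)
  else loopB limit.toNat [] stack (stack.getD (stack.length - 2) 0)
    (stack.getD (stack.length - 1) 0) stack.sum (stack.length : Int)

-- ===== PRECONDITION & SPEC =====
def Spec_byte1_nonce_generator (seed_a : Int) (seed_b : Int) (limit : Int) (memory_stack : Option (List Int)) (out : List Int × List Int) : Prop := out = byte1_nonce_generator_alt seed_a seed_b limit memory_stack
instance (seed_a : Int) (seed_b : Int) (limit : Int) (memory_stack : Option (List Int)) (out : List Int × List Int) : Decidable (Spec_byte1_nonce_generator seed_a seed_b limit memory_stack out) := by unfold Spec_byte1_nonce_generator; infer_instance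

-- ===== CLAIM (what is proved, stated in full; the proofs are below) =====
def Claim_equal_byte1_nonce_generator : Prop := ∀ (seed_a : Int) (seed_b : Int) (limit : Int) (memory_stack : Option (List Int)), Dom_byte1_nonce_generator seed_a seed_b limit memory_stack → Spec_byte1_nonce_generator seed_a seed_b limit memory_stack (byte1_nonce_generator seed_a seed_b limit memory_stack)

-- ===== LEMMAS AND PROOFS =====

lemma getD_append_add {s l : List Int} {i : Nat} : (s ++ l).getD (s.length + i) 0 = l.getD i 0 := by
  induction s with
  | nil => simp
  | cons hd tl ih => simpa [Nat.succ_add] using ih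

lemma set_append_len {s l : List Int} {d : Int} : (s ++ l).set s.length d = s ++ l.set 0 d := by
  induction s with
  | nil => rfl
  | cons hd tl ih => simp [ih]

lemma getD_last7 (s : List Int) (e1 e2 e3 e4 e5 e6 e7 : Int) :
    (s ++ [e1, e2, e3, e4, e5, e6, e7]).getD ((s ++ [e1, e2, e3, e4, e5, e6, e7]).length - 1) 0 = e7 := by
  have h : (s ++ [e1, e2, e3, e4, e5, e6, e7]).length - 1 = s.length + 6 := by simp
  rw [h, getD_append_add]; rfl

lemma getD_snd7 (s : List Int) (e1 e2 e3 e4 e5 e6 e7 : Int) :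
    (s ++ [e1, e2, e3, e4, e5, e6, e7]).getD ((s ++ [e1, e2, e3, e4, e5, e6, e7]).length - 2) 0 = e6 := by
  have h : (s ++ [e1, e2, e3, e4, e5, e6, e7]).length - 2 = s.length + 5 := by simp
  rw [h, getD_append_add]; rfl

-- one unfolded iteration of A's loop, with the mutated stack written as a single 7-element append
lemma stepA (k : Nat) (nonces s : List Int) (a b : Int)
    (h2 : ¬ s.length < 2)
    (ha : s.getD (s.length - 2) 0 = a) (hb : s.getD (s.length - 1) 0 = b) :
    loopA (k + 1) nonces s =
      loopA k (nonces ++ [a + b])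
        (s ++ [a + b - b, (if b - a > 0 then binDigits (b - a) else 1),
               a + b, a + b + b, ((s.length : Int) + 4),
               binDigits (s.sum + ((a + b - b) + ((if b - a > 0 then binDigits (b - a) else 1) +
                 ((a + b) + ((a + b + b) + ((s.length : Int) + 4)))))),
               a + b]) := by
  simp only [loopA, if_neg h2, ha, hb]
  have h3 : ((s ++ [if b - a > 0 then binDigits (b - a) else 1] ++
      [if b - a > 0 then binDigits (b - a) else 1] ++ [a + b]).length - 3) = s.length := by
    simp
  rw [h3]
  have h4 : (s ++ [if b - a > 0 then binDigits (b - a) else 1] ++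
      [if b - a > 0 then binDigits (b - a) else 1] ++ [a + b]) =
      s ++ [if b - a > 0 then binDigits (b - a) else 1,
            if b - a > 0 then binDigits (b - a) else 1, a + b] := by
    simp
  rw [h4, set_append_len]
  simp only [List.set]
  simp only [List.append_assoc, List.cons_append, List.nil_append]
  rw [getD_last7]
  simp only [List.sum_append, List.sum_cons, List.sum_nil, List.length_append,
    List.length_cons, List.length_nil]
  push_cast
  ring_nf

lemma loop_eq : ∀ (fuel : Nat) (s nonces : List Int), 2 ≤ s.length →
    loopA fuel nonces s =
      loopB fuel nonces s (s.getD (s.length - 2) 0) (s.getD (s.length - 1) 0) s.sum (s.length : Int) := by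
  intro fuel
  induction fuel with
  | zero => intro s nonces h; rfl
  | succ k ih =>
    intro s nonces h
    generalize ha : s.getD (s.length - 2) 0 = a
    generalize hb : s.getD (s.length - 1) 0 = b
    rw [stepA k nonces s a b (by omega) ha hb]
    have hc : s.sum + (a + b - b + ((if b - a > 0 then binDigits (b - a) else 1) +
        (a + b + (a + b + b + ((s.length : Int) + 4))))) =
        s.sum + (a + b - b) + (if b - a > 0 then binDigits (b - a) else 1) +
        (a + b) + (a + b + b) + ((s.length : Int) + 4) := by ring
    rw [hc]
    rw [ih _ _ (by simp)]
    rw [loopB]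
    congr 1
    · rw [getD_snd7]
    · rw [getD_last7]
    · simp only [List.sum_append, List.sum_cons, List.sum_nil]
      ring_nf
    · simp only [List.length_append, List.length_cons, List.length_nil]
      push_cast
      ring_nf

-- ===== VERDICT (by name: the statement is the Claim_ definition above) =====
theorem byte1_nonce_generator_spec : Claim_equal_byte1_nonce_generator := by
  intro seed_a seed_b limit memory_stack _
  unfold Spec_byte1_nonce_generator byte1_nonce_generator byte1_nonce_generator_alt
  set stack := (match memory_stack with
    | some l => if l.isEmpty then [seed_a, seed_b] else l
    | none => [seed_a, seed_b]) with hst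
  by_cases h : stack.length < 2
  · rw [if_pos h]
    cases hf : limit.toNat with
    | zero => rfl
    | succ k => simp only [loopA]; rw [if_pos h]
  · rw [if_neg h]
    exact loop_eq _ _ _ (by omega)
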